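-- pv_equiv track=rewrite | github.com/jianbangzhang/anno_platform | agent/utils/utils.py | transform
-- ===== SOURCE A (Python) =====
-- def transform(lst):
--     total_data=[]
--     for data in lst:
--         data=data.strip()
--         if data:
--             if "\n" in data:
--                 lst=data.split("\n")
--                 lst=[e.strip() for e in lst if e.strip()]
--                 total_data+=lst
--             else:
--                 total_data.append(data)
--         else:
--             continue
--     total_data=[line+"\n"+"<end>" if line.startswith("Action_Parameter") else line for line in total_data]
--     return total_data
-- ===== SOURCE B (Python) =====
-- def transform(lst):
--     out = []
--     for line in "\n".join(lst).split("\n"):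
--         line = line.strip()
--         if line:
--             out.append(line + "\n<end>" if line.startswith("Action_Parameter") else line)
--     return out
-- ===== Notes on version B (the rewrite author's own statement) =====
-- stated objective: alternative
-- what changed: B replaces A's per-element processing (strip each element, branch on newline presence, accumulate an intermediate list, then a second tagging map pass) by a global-string algorithm: it joins the whole input into ONE string with '\n'.join, performs a single flat split('\n') of that string, and processes the resulting flat line stream in one loop (strip, drop empties, tag on append); no per-element branch, no intermediate list, no second pass.
import Mathlib
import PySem

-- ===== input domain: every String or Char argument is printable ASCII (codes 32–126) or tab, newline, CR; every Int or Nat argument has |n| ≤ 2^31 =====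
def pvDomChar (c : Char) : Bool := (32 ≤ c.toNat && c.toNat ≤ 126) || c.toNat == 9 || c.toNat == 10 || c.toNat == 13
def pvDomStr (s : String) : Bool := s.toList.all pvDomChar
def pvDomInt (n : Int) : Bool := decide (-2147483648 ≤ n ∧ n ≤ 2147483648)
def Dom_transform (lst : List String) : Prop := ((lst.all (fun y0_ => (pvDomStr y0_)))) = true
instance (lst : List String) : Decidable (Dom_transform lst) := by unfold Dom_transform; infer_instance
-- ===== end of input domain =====

-- B is a global-string algorithm: it joins the whole input into one string with "\n".join,
-- splits that single string once, and tags/filters the flat line stream in one loop;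
-- A processes element by element with a newline-presence branch, an intermediate list and
-- a second tagging pass.  Objective: alternative (same asymptotic cost).

-- ===== PORT A =====
def transform (lst : List String) : List String :=
  let total_data : List String := lst.foldl (fun total_data data =>
    let data := PySem.Str.strip data
    if data ≠ "" then
      if PySem.Str.isIn "\n" data then
        let l := (PySem.Str.split? data "\n").getD []
        let l := l.filterMap (fun e => if PySem.Str.strip e ≠ "" then some (PySem.Str.strip e) else none)
        total_data ++ l
      else
        total_data ++ [data]
    else
      total_data) []
  total_data.map (fun line =>
    if PySem.Str.startswith line "Action_Parameter" then line ++ "\n" ++ "<end>" else line)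

-- ===== PORT B =====
def transform_alt (lst : List String) : List String :=
  ((PySem.Str.split? (PySem.Str.join "\n" lst) "\n").getD []).foldl (fun out line =>
    let line := PySem.Str.strip line
    if line ≠ "" then
      out ++ [if PySem.Str.startswith line "Action_Parameter" then line ++ "\n<end>" else line]
    else out) []

-- ===== PRECONDITION & SPEC =====
def Spec_transform (lst : List String) (out : List String) : Prop := out = transform_alt lst
instance (lst : List String) (out : List String) : Decidable (Spec_transform lst out) := by unfold Spec_transform; infer_instance

-- ===== CLAIM (what is proved, stated in full; the proofs are below) =====
def Claim_equal_transform : Prop := ∀ (lst : List String), Dom_transform lst → Spec_transform lst (transform lst)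

-- ===== LEMMAS AND PROOFS =====

-- the tagging function (B's inline conditional expression)
def pvTag (line : String) : String :=
  if PySem.Str.startswith line "Action_Parameter" then line ++ "\n<end>" else line

-- the strip-and-filter step both programs apply to each raw line
def pvKeep (e : String) : Option String :=
  if PySem.Str.strip e ≠ "" then some (PySem.Str.strip e) else none

def pvKeepC (p : List Char) : Option (List Char) :=
  if PySem.Chars.strip p ≠ [] then some (PySem.Chars.strip p) else none

-- reference splitter: what splitting on a single '\n' does, structurally
def pvSplit : List Char → List (List Char)
  | [] => [[]]
  | c :: t => if c = '\n' then [] :: pvSplit t else (pvSplit t).modifyHead (c :: ·)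

-- the cleaned line list of a raw character string
def pvClean (s : List Char) : List (List Char) := (pvSplit s).filterMap pvKeepC

lemma str_of_toList_eq {a b : String} (h : a.toList = b.toList) : a = b := String.toList_inj.mp h

lemma tagA_eq (line : String) :
    (if PySem.Str.startswith line "Action_Parameter" then line ++ "\n" ++ "<end>" else line)
    = pvTag line := by
  unfold pvTag
  split_ifs with h
  · apply str_of_toList_eq; simp
  · rfl

lemma pvSplit_ne_nil (s : List Char) : pvSplit s ≠ [] := by
  induction s with
  | nil => simp [pvSplit]
  | cons c t ih =>
    by_cases h : c = '\n'
    · simp [pvSplit, h]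
    · simp only [pvSplit, h, if_neg h]
      cases hm : pvSplit t with
      | nil => exact absurd hm ih
      | cons p ps => simp

lemma modifyHead_modifyHead {α : Type} (f g : α → α) (l : List α) :
    (l.modifyHead g).modifyHead f = l.modifyHead (f ∘ g) := by
  cases l <;> rfl

lemma modifyHead_append {α : Type} (f : α → α) (l l' : List α) (h : l ≠ []) :
    (l ++ l').modifyHead f = l.modifyHead f ++ l' := by
  cases l with
  | nil => exact absurd rfl h
  | cons a t => rfl

lemma go_eq (s : List Char) : ∀ (fuel : Nat) (cur : List Char) (accs : List (List Char)),
    s.length < fuel →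
    PySem.Chars.splitOn.go ['\n'] fuel s cur accs
      = accs.reverse ++ (pvSplit s).modifyHead (cur.reverse ++ ·) := by
  induction s with
  | nil =>
    intro fuel cur accs hf
    cases fuel with
    | zero => omega
    | succ n => simp [PySem.Chars.splitOn.go, pvSplit]
  | cons c rest ih =>
    intro fuel cur accs hf
    cases fuel with
    | zero => simp at hf
    | succ n =>
      by_cases hc : c = '\n'
      · have hpre : List.isPrefixOf ['\n'] (c :: rest) = true := by
          simp [List.isPrefixOf, hc]
        rw [PySem.Chars.splitOn.go]
        simp only [hpre, if_pos rfl]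
        rw [show List.drop ['\n'].length (c :: rest) = rest from by simp]
        rw [ih n [] (cur.reverse :: accs) (by simpa using Nat.lt_of_succ_lt_succ hf)]
        have : (pvSplit rest).modifyHead (List.reverse [] ++ ·) = pvSplit rest := by
          cases pvSplit rest <;> simp
        rw [this]
        simp [pvSplit, hc]
      · have hpre : List.isPrefixOf ['\n'] (c :: rest) = false := by
          simp [List.isPrefixOf]; intro hh; exact absurd hh.symm hc
        rw [PySem.Chars.splitOn.go]
        simp only [hpre, Bool.false_eq_true, if_neg]
        rw [ih n (c :: cur) accs (by simpa using Nat.lt_of_succ_lt_succ hf)]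
        simp only [pvSplit, if_neg hc, modifyHead_modifyHead, if_false]
        have hfg : (fun x => (c :: cur).reverse ++ x) = ((fun x => cur.reverse ++ x) ∘ fun x => c :: x) := by
          funext x; simp
        rw [hfg]

lemma splitOn_eq_pvSplit (s : List Char) :
    PySem.Chars.splitOn s ['\n'] = pvSplit s := by
  unfold PySem.Chars.splitOn
  rw [go_eq s (s.length + 1) [] [] (by omega)]
  cases pvSplit s <;> simp

-- structural rules for pvSplit
lemma pvSplit_append_sep (a b : List Char) :
    pvSplit (a ++ '\n' :: b) = pvSplit a ++ pvSplit b := by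
  induction a with
  | nil => simp [pvSplit]
  | cons c t ih =>
    by_cases hc : c = '\n'
    · simp [pvSplit, hc, ih]
    · simp only [List.cons_append, pvSplit, if_neg hc, ih]
      rw [modifyHead_append _ _ _ (pvSplit_ne_nil t)]

lemma pvSplit_no_sep (s : List Char) (h : '\n' ∉ s) : pvSplit s = [s] := by
  induction s with
  | nil => rfl
  | cons c t ih =>
    have hc : c ≠ '\n' := fun hh => h (by simp [hh])
    simp [pvSplit, hc, ih (fun hm => h (List.mem_cons_of_mem _ hm))]

lemma pvSplit_snoc (s : List Char) (c : Char) (hc : c ≠ '\n') :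
    pvSplit (s ++ [c]) = (pvSplit s).dropLast ++ [(pvSplit s).getLastD [] ++ [c]] := by
  induction s with
  | nil => simp [pvSplit, hc]
  | cons a t ih =>
    by_cases ha : a = '\n'
    · simp only [List.cons_append, pvSplit, if_pos ha, ih]
      cases hm : pvSplit t with
      | nil => exact absurd hm (pvSplit_ne_nil t)
      | cons p ps => simp
    · simp only [List.cons_append, pvSplit, if_neg ha, ih]
      cases hm : pvSplit t with
      | nil => exact absurd hm (pvSplit_ne_nil t)
      | cons p ps =>
        cases ps with
        | nil => simp
        | cons q r => simp

-- strip facts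
lemma dropWhile_idem (p : Char → Bool) (l : List Char) :
    List.dropWhile p (List.dropWhile p l) = List.dropWhile p l := by
  induction l with
  | nil => rfl
  | cons a t ih =>
    by_cases h : p a
    · simp [h, ih]
    · simp [h]

lemma dropWhile_head?_false (p : Char → Bool) (a : Char) :
    ∀ (l : List Char), (List.dropWhile p l).head? = some a → p a = false := by
  intro l
  induction l with
  | nil => simp
  | cons b t ih =>
    by_cases h : p b
    · simpa [h] using ih
    · simp [h]; rintro rfl; simpa using h

lemma dropWhile_prefix_fixed (p : Char → Bool) (l u : List Char)
    (hu : u <+: List.dropWhile p l) : List.dropWhile p u = u := by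
  cases u with
  | nil => rfl
  | cons a t =>
    have ha : p a = false := by
      obtain ⟨r, hr⟩ := hu
      exact dropWhile_head?_false p a l (by rw [← hr]; simp)
    simp [ha]

lemma chars_strip_idem (s : List Char) :
    PySem.Chars.strip (PySem.Chars.strip s) = PySem.Chars.strip s := by
  unfold PySem.Chars.strip PySem.Chars.rstrip PySem.Chars.lstrip
  have hvt : ((List.dropWhile PySem.Chars.isspace (List.dropWhile PySem.Chars.isspace s).reverse).reverse)
      <+: List.dropWhile PySem.Chars.isspace s := by
    have h := List.reverse_prefix.mpr
      (List.dropWhile_suffix (l := (List.dropWhile PySem.Chars.isspace s).reverse) PySem.Chars.isspace)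
    rwa [List.reverse_reverse] at h
  have h1 := dropWhile_prefix_fixed PySem.Chars.isspace s _ hvt
  rw [h1, List.reverse_reverse, dropWhile_idem]

lemma strip_cons_space (c : Char) (p : List Char) (hc : PySem.Chars.isspace c = true) :
    PySem.Chars.strip (c :: p) = PySem.Chars.strip p := by
  unfold PySem.Chars.strip PySem.Chars.lstrip
  simp [List.dropWhile_cons, hc]

lemma rstrip_snoc_space (c : Char) (p : List Char) (hc : PySem.Chars.isspace c = true) :
    PySem.Chars.rstrip (p ++ [c]) = PySem.Chars.rstrip p := by
  unfold PySem.Chars.rstrip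
  simp [List.dropWhile_cons, hc]

lemma strip_snoc_space (c : Char) (p : List Char) (hc : PySem.Chars.isspace c = true) :
    PySem.Chars.strip (p ++ [c]) = PySem.Chars.strip p := by
  unfold PySem.Chars.strip PySem.Chars.lstrip
  rw [List.dropWhile_append]
  by_cases h : (List.dropWhile PySem.Chars.isspace p).isEmpty
  · simp only [h, if_pos]
    have h' : List.dropWhile PySem.Chars.isspace p = [] := by simpa [List.isEmpty_iff] using h
    simp [List.dropWhile_cons, hc, h', PySem.Chars.rstrip]
  · simp only [h, if_neg, Bool.false_eq_true, not_false_iff]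
    exact rstrip_snoc_space c _ hc

lemma pvKeepC_nil : pvKeepC [] = none := by simp [pvKeepC, PySem.Chars.strip, PySem.Chars.lstrip, PySem.Chars.rstrip]

lemma dropLast_getLastD (L : List (List Char)) (h : L ≠ []) :
    L.dropLast ++ [L.getLastD []] = L := by
  rw [List.getLastD_eq_getLast?, List.getLast?_eq_getLast (h := h), Option.getD_some,
    List.dropLast_append_getLast h]

lemma clean_cons_space (c : Char) (s : List Char) (hc : PySem.Chars.isspace c = true) :
    pvClean (c :: s) = pvClean s := by
  unfold pvClean
  by_cases h : c = '\n'
  · simp [pvSplit, h, pvKeepC_nil]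
  · simp only [pvSplit, if_neg h]
    cases hm : pvSplit s with
    | nil => exact absurd hm (pvSplit_ne_nil s)
    | cons p ps =>
      simp [List.filterMap_cons, pvKeepC, strip_cons_space c p hc]

lemma clean_snoc_space (c : Char) (s : List Char) (hc : PySem.Chars.isspace c = true) :
    pvClean (s ++ [c]) = pvClean s := by
  unfold pvClean
  by_cases h : c = '\n'
  · subst h
    rw [show s ++ ['\n'] = s ++ '\n' :: [] from rfl, pvSplit_append_sep]
    simp [pvSplit, pvKeepC_nil]
  · rw [pvSplit_snoc s c h]
    conv_rhs => rw [← dropLast_getLastD (pvSplit s) (pvSplit_ne_nil s)]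
    rw [List.filterMap_append, List.filterMap_append]
    congr 1
    simp [List.filterMap_cons, pvKeepC, strip_snoc_space _ _ hc]

lemma clean_ws_prefix (w s : List Char) (h : ∀ c ∈ w, PySem.Chars.isspace c = true) :
    pvClean (w ++ s) = pvClean s := by
  induction w with
  | nil => rfl
  | cons c t ih =>
    rw [List.cons_append, clean_cons_space c _ (h c (by simp))]
    exact ih (fun c hc => h c (by simp [hc]))

lemma clean_ws_suffix (w : List Char) : ∀ (s : List Char), (∀ c ∈ w, PySem.Chars.isspace c = true) →
    pvClean (s ++ w) = pvClean s := by
  induction w with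
  | nil => intro s _; simp
  | cons c t ih =>
    intro s h
    rw [show s ++ c :: t = (s ++ [c]) ++ t from by simp, ih _ (fun c hc => h c (by simp [hc])),
      clean_snoc_space c s (h c (by simp))]

lemma clean_strip (s : List Char) : pvClean (PySem.Chars.strip s) = pvClean s := by
  have h1 : pvClean (PySem.Chars.lstrip s) = pvClean s := by
    conv_rhs => rw [show s = List.takeWhile PySem.Chars.isspace s ++ List.dropWhile PySem.Chars.isspace s from (List.takeWhile_append_dropWhile).symm]
    rw [clean_ws_prefix _ _ (fun c hc => List.mem_takeWhile_imp hc)]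
    rfl
  rw [← h1]
  set t := PySem.Chars.lstrip s with ht
  have h2 : t = PySem.Chars.rstrip t ++ (List.takeWhile PySem.Chars.isspace t.reverse).reverse := by
    show t = (List.dropWhile PySem.Chars.isspace t.reverse).reverse
      ++ (List.takeWhile PySem.Chars.isspace t.reverse).reverse
    conv_lhs => rw [← List.reverse_reverse t,
      ← List.takeWhile_append_dropWhile (p := PySem.Chars.isspace) (l := t.reverse)]
    rw [List.reverse_append]
  have h3 : pvClean t = pvClean (PySem.Chars.rstrip t) := by
    conv_lhs => rw [h2]
    exact clean_ws_suffix _ _ (fun c hc => List.mem_takeWhile_imp (List.mem_reverse.mp hc))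
  rw [h3]
  rfl

-- string-level bridges
lemma str_eq_empty_iff (s : String) : s = "" ↔ s.toList = [] := by
  constructor
  · intro h; simp [h]
  · intro h; exact str_of_toList_eq (by simp [h])

lemma pvKeep_ofList (p : List Char) :
    pvKeep (String.ofList p) = (pvKeepC p).map String.ofList := by
  unfold pvKeep pvKeepC
  have hs : PySem.Str.strip (String.ofList p) = String.ofList (PySem.Chars.strip p) := by
    apply str_of_toList_eq; simp
  by_cases h : PySem.Chars.strip p = []
  · simp [hs, h, str_eq_empty_iff]
  · have hne : String.ofList (PySem.Chars.strip p) ≠ "" := fun hh =>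
      h (by simpa using congrArg String.toList hh)
    simp [hs, h, hne]

lemma filterMap_keep_map_ofList (ps : List (List Char)) :
    (ps.map String.ofList).filterMap pvKeep = (ps.filterMap pvKeepC).map String.ofList := by
  induction ps with
  | nil => rfl
  | cons p t ih =>
    simp only [List.map_cons, List.filterMap_cons, pvKeep_ofList, ih]
    cases pvKeepC p <;> simp

lemma str_split_eq (s : String) :
    (PySem.Str.split? s "\n").getD [] = (pvSplit s.toList).map String.ofList := by
  unfold PySem.Str.split? PySem.Chars.split?
  rw [show ("\n" : String).toList = ['\n'] from by decide]
  simp [splitOn_eq_pvSplit]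

-- B's fold = tag ∘ filter over the flat pieces
lemma inner_fold (pieces : List String) (acc : List String) :
    pieces.foldl (fun out line =>
      let line := PySem.Str.strip line
      if line ≠ "" then
        out ++ [if PySem.Str.startswith line "Action_Parameter" then line ++ "\n<end>" else line]
      else out) acc
    = acc ++ (pieces.filterMap pvKeep).map pvTag := by
  induction pieces generalizing acc with
  | nil => simp
  | cons p t ih =>
    simp only [List.foldl_cons, List.filterMap_cons]
    rw [ih]
    by_cases h : PySem.Str.strip p = ""
    · simp [h, pvKeep]
    · simp [h, pvKeep, pvTag]

-- A's fold = flatMap of per-element contributions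
def pvContrib (d : String) : List String :=
  if PySem.Str.strip d ≠ "" then
    if PySem.Str.isIn "\n" (PySem.Str.strip d) then
      ((PySem.Str.split? (PySem.Str.strip d) "\n").getD []).filterMap pvKeep
    else [PySem.Str.strip d]
  else []

lemma A_fold (lst : List String) (acc : List String) :
    lst.foldl (fun total_data data =>
      if PySem.Str.strip data ≠ "" then
        if PySem.Str.isIn "\n" (PySem.Str.strip data) then
          total_data ++ ((PySem.Str.split? (PySem.Str.strip data) "\n").getD []).filterMap
            (fun e => if PySem.Str.strip e ≠ "" then some (PySem.Str.strip e) else none)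
        else total_data ++ [PySem.Str.strip data]
      else total_data) acc
    = acc ++ lst.flatMap pvContrib := by
  induction lst generalizing acc with
  | nil => simp
  | cons d t ih =>
    have hstep : (if PySem.Str.strip d ≠ "" then
        if PySem.Str.isIn "\n" (PySem.Str.strip d) then
          acc ++ ((PySem.Str.split? (PySem.Str.strip d) "\n").getD []).filterMap
            (fun e => if PySem.Str.strip e ≠ "" then some (PySem.Str.strip e) else none)
        else acc ++ [PySem.Str.strip d]
      else acc) = acc ++ pvContrib d := by
      by_cases h0 : PySem.Str.strip d = ""
      · simp [pvContrib, h0]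
      · simp [pvContrib, pvKeep, h0]
        split_ifs <;> rfl
    rw [List.foldl_cons, hstep, ih, List.flatMap_cons, List.append_assoc]

-- singleton infix from membership
lemma singleton_infix_of_mem {l : List Char} {a : Char} (h : a ∈ l) : [a] <:+: l := by
  obtain ⟨s, t, rfl⟩ := List.append_of_mem h
  exact ⟨s, t, by simp⟩

-- per-element: A's contribution is the cleaned line list of the raw element
lemma contrib_eq (d : String) : pvContrib d = (pvClean d.toList).map String.ofList := by
  unfold pvContrib
  by_cases h0 : PySem.Str.strip d = ""
  · have hC : PySem.Chars.strip d.toList = [] := by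
      have := congrArg String.toList h0
      simpa using this
    rw [← clean_strip d.toList, hC]
    simp [h0, pvClean, pvSplit, pvKeepC_nil]
  · have hC : PySem.Chars.strip d.toList ≠ [] := by
      intro hh
      exact h0 (str_of_toList_eq (by simpa using hh))
    have hlist : (PySem.Str.strip d).toList = PySem.Chars.strip d.toList := by simp
    cases hIn : PySem.Str.isIn "\n" (PySem.Str.strip d) with
    | true =>
      simp only [h0, ne_eq, not_false_iff, if_true, ite_true, hIn]
      rw [str_split_eq, filterMap_keep_map_ofList, ← pvClean, hlist, clean_strip]
    | false =>
      simp only [h0, ne_eq, not_false_iff, if_true, ite_true, hIn, Bool.false_eq_true, if_false]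
      have hmem : '\n' ∉ PySem.Chars.strip d.toList := by
        intro hm
        have : PySem.Str.isIn "\n" (PySem.Str.strip d) = true := by
          rw [PySem.Str.isIn_iff_infix]
          rw [show ("\n" : String).toList = ['\n'] from by decide, hlist]
          exact singleton_infix_of_mem hm
        rw [this] at hIn; cases hIn
      rw [← clean_strip d.toList]
      unfold pvClean
      rw [pvSplit_no_sep _ hmem]
      simp only [List.filterMap_cons, List.filterMap_nil, pvKeepC, chars_strip_idem, hC,
        ne_eq, not_false_iff, if_true]
      simp only [List.map_cons, List.map_nil]
      rw [show String.ofList (PySem.Chars.strip d.toList) = PySem.Str.strip d from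
        str_of_toList_eq (by simp)]

-- the join/split flattening
lemma clean_join (ds : List (List Char)) (h : ds ≠ []) :
    pvClean (PySem.Chars.join ['\n'] ds) = ds.flatMap pvClean := by
  induction ds with
  | nil => exact absurd rfl h
  | cons d t ih =>
    cases t with
    | nil => simp [PySem.Chars.join, List.intercalate]
    | cons d' r =>
      have hj : PySem.Chars.join ['\n'] (d :: d' :: r)
          = d ++ '\n' :: PySem.Chars.join ['\n'] (d' :: r) := by
        simp [PySem.Chars.join, List.intercalate, List.intersperse]
      rw [hj]
      unfold pvClean
      rw [pvSplit_append_sep, List.filterMap_append]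
      rw [show (pvSplit (PySem.Chars.join ['\n'] (d' :: r))).filterMap pvKeepC
        = pvClean (PySem.Chars.join ['\n'] (d' :: r)) from rfl, ih (by simp)]
      have hfn : pvClean = fun s => List.filterMap pvKeepC (pvSplit s) := rfl
      rw [hfn]
      simp

lemma final_eq (lst : List String) :
    ((PySem.Str.split? (PySem.Str.join "\n" lst) "\n").getD []).foldl (fun out line =>
      let line := PySem.Str.strip line
      if line ≠ "" then
        out ++ [if PySem.Str.startswith line "Action_Parameter" then line ++ "\n<end>" else line]
      else out) []
    = (lst.foldl (fun total_data data =>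
        if PySem.Str.strip data ≠ "" then
          if PySem.Str.isIn "\n" (PySem.Str.strip data) then
            total_data ++ ((PySem.Str.split? (PySem.Str.strip data) "\n").getD []).filterMap
              (fun e => if PySem.Str.strip e ≠ "" then some (PySem.Str.strip e) else none)
          else total_data ++ [PySem.Str.strip data]
        else total_data) []).map (fun line =>
      if PySem.Str.startswith line "Action_Parameter" then line ++ "\n" ++ "<end>" else line) := by
  simp only [tagA_eq]
  rw [A_fold, inner_fold]
  simp only [List.nil_append]
  congr 1
  rw [str_split_eq, filterMap_keep_map_ofList]
  cases lst with
  | nil => decide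
  | cons d t =>
    have hjoin : (PySem.Str.join "\n" (d :: t)).toList
        = PySem.Chars.join ['\n'] ((d :: t).map String.toList) := by
      unfold PySem.Str.join
      rw [show ("\n" : String).toList = ['\n'] from by decide]
      simp
    rw [show (pvSplit (PySem.Str.join "\n" (d :: t)).toList).filterMap pvKeepC
      = pvClean (PySem.Str.join "\n" (d :: t)).toList from rfl]
    rw [hjoin, clean_join _ (by simp)]
    rw [List.flatMap_map]
    rw [List.map_flatMap]
    have hfn : pvContrib = fun a => List.map String.ofList (pvClean a.toList) := funext contrib_eq
    rw [hfn]

-- ===== VERDICT (by name: the statement is the Claim_ definition above) =====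
theorem transform_spec : Claim_equal_transform := by
  intro lst _
  unfold Spec_transform transform transform_alt
  exact (final_eq lst).symm
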